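-- pv_equiv track=rewrite | github.com/zivoy/flowaboat | replayParser.py | get_uleb126
-- ===== SOURCE A (Python) =====
-- def get_uleb126(byte_str):
--     uleb_parts = []
--     while byte_str[0] >= 0x80:
--         uleb_parts.append(byte_str[0] - 0x80)
--         byte_str = byte_str[1:]
--     uleb_parts.append(byte_str[0])
--     byte_str = byte_str[1:]
--     uleb_parts = uleb_parts[::-1]
--     integer = 0
--     for i in range(len(uleb_parts) - 1):
--         integer = (integer + uleb_parts[i]) << 7
--     integer += uleb_parts[-1]
--     return byte_str, integer
-- ===== SOURCE B (Python) =====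
-- def get_uleb126(byte_str):
--     integer = 0
--     shift = 0
--     i = 0
--     while byte_str[i] >= 0x80:
--         integer += (byte_str[i] - 0x80) << shift
--         shift += 7
--         i += 1
--     integer += byte_str[i] << shift
--     return byte_str[i + 1:], integer
-- ===== Notes on version B (the rewrite author's own statement) =====
-- stated objective: simpler
-- what changed: Decode in one forward accumulating pass (running shift added per byte) instead of collecting continuation bytes into a list via repeated byte_str[1:] slicing, reversing it and running a second Horner loop.
import Mathlib
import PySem

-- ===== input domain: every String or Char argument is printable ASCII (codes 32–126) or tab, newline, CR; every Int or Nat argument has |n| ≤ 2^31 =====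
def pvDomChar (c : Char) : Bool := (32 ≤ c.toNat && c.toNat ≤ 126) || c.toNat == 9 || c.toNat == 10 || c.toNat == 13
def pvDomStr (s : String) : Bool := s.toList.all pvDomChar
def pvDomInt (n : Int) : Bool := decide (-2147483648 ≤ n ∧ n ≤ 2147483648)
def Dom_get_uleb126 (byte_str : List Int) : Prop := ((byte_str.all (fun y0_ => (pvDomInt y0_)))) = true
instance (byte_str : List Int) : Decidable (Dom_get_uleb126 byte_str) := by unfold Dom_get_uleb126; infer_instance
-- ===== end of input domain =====

-- B replaces A's collect-reverse-Horner with a single forward accumulating pass (objective: simpler).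


-- ===== PORT A =====
-- the while loop: consumes leading bytes ≥ 0x80, appending (byte - 0x80) to uleb_parts;
-- [] case is Python's IndexError (byte_str[0] on empty), excluded by Pre_.
def auleb_loop : List Int → List Int → List Int × List Int
  | [], parts => ([], parts)
  | b :: rest, parts =>
    if b ≥ 128 then auleb_loop rest (parts ++ [b - 128]) else (b :: rest, parts)

-- the code after the while loop: append byte_str[0], slice, reverse, Horner fold.
-- '<< 7' is written '* 128' (exact on Int); parts[-1] on the nonempty list is getLastD 0.
def auleb_fin : List Int × List Int → List Int × Int
  | ([], _) => ([], 0)   -- IndexError path (byte_str[0]), excluded by Pre_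
  | (b :: rest, parts0) =>
    let parts1 := parts0 ++ [b]
    let parts := parts1.reverse
    let integer :=
      (List.range (parts.length - 1)).foldl (fun acc i => (acc + parts.getD i 0) * 128) 0
    (rest, integer + parts.getLastD 0)

def get_uleb126 (byte_str : List Int) : List Int × Int :=
  auleb_fin (auleb_loop byte_str [])

-- ===== PORT B =====
-- one forward pass: integer += (b - 0x80) << shift per continuation byte, then the final
-- byte << shift; structural recursion returns the remaining list directly (byte_str[i+1:]).
-- '<< shift' is '* 2^shift' (exact on Int); [] is the IndexError path, excluded by Pre_.
def buleb_loop : List Int → Int → Nat → List Int × Int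
  | [], integer, _ => ([], integer)
  | b :: rest, integer, shift =>
    if b ≥ 128 then buleb_loop rest (integer + (b - 128) * 2 ^ shift) (shift + 7)
    else (rest, integer + b * 2 ^ shift)

def get_uleb126_alt (byte_str : List Int) : List Int × Int :=
  buleb_loop byte_str 0 0

-- ===== PRECONDITION & SPEC =====
-- Pre_ excludes exactly the inputs on which A raises IndexError: lists with no byte < 0x80
-- (including the empty list), where the loop runs off the end.
def Pre_get_uleb126 (byte_str : List Int) : Prop := ∃ x ∈ byte_str, x < 128
instance (byte_str : List Int) : Decidable (Pre_get_uleb126 byte_str) := by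
  unfold Pre_get_uleb126; infer_instance

def pvWitness_get_uleb126 : List Int := [229, 10, 7]

def Spec_get_uleb126 (byte_str : List Int) (out : List Int × Int) : Prop := out = get_uleb126_alt byte_str
instance (byte_str : List Int) (out : List Int × Int) : Decidable (Spec_get_uleb126 byte_str out) := by unfold Spec_get_uleb126; infer_instance

-- ===== CLAIM (what is proved, stated in full; the proofs are below) =====
def Claim_equal_get_uleb126 : Prop := ∀ (byte_str : List Int), Dom_get_uleb126 byte_str → Pre_get_uleb126 byte_str → Spec_get_uleb126 byte_str (get_uleb126 byte_str)

-- ===== LEMMAS AND PROOFS =====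

-- reference decoder (proof-only): little-endian value of the consumed prefix plus the rest
def fspec : List Int → List Int × Int
  | [] => ([], 0)
  | b :: rest =>
    if b ≥ 128 then ((fspec rest).1, (b - 128) + 128 * (fspec rest).2)
    else (rest, b)

-- little-endian base-128 value of a list
def valLE : List Int → Int
  | [] => 0
  | x :: xs => x + 128 * valLE xs

-- big-endian Horner fold over a list (what A's index loop computes on a prefix)
def foldBE (q : List Int) : Int := q.foldl (fun a x => (a + x) * 128) 0

theorem foldBE_append (l : List Int) (x : Int) :
    foldBE (l ++ [x]) = (foldBE l + x) * 128 := by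
  simp [foldBE, List.foldl_append]

theorem valLE_append (l m : List Int) :
    valLE (l ++ m) = valLE l + 128 ^ l.length * valLE m := by
  induction l with
  | nil => simp [valLE]
  | cons x xs ih => simp [valLE, ih, pow_succ]; ring

theorem foldBE_reverse (l : List Int) : foldBE l.reverse = 128 * valLE l := by
  induction l with
  | nil => simp [foldBE, valLE]
  | cons x xs ih => simp [valLE, List.reverse_cons, foldBE_append, ih]; ring

-- A's index loop over range (len-1) equals foldBE on the dropLast prefix
theorem range_fold_take (q : List Int) (m : Nat) (hm : m ≤ q.length) :
    (List.range m).foldl (fun acc i => (acc + q.getD i 0) * 128) 0 = foldBE (q.take m) := by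
  induction m with
  | zero => simp [foldBE]
  | succ k ih =>
    have hk : k ≤ q.length := Nat.le_of_succ_le hm
    have hkl : k < q.length := hm
    rw [List.range_succ, List.foldl_append, ih hk]
    have : q.take (k + 1) = q.take k ++ [q[k]] := by
      rw [List.take_add_one]
      simp [List.getElem?_eq_getElem hkl]
    rw [this, foldBE_append]
    simp [List.getD, List.getElem?_eq_getElem hkl]

theorem auleb_fin_eq (b : Int) (rest parts : List Int) :
    auleb_fin (b :: rest, parts) = (rest, valLE (parts ++ [b])) := by
  show (rest, _) = _
  have hne : parts ++ [b] ≠ [] := by simp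
  have hlen : ((parts ++ [b]).reverse).length - 1 ≤ ((parts ++ [b]).reverse).length :=
    Nat.sub_le _ _
  rw [range_fold_take _ _ hlen]
  have hdrop : ((parts ++ [b]).reverse).take (((parts ++ [b]).reverse).length - 1)
      = ((parts ++ [b]).reverse).dropLast := by
    rw [List.dropLast_eq_take]
  rw [hdrop]
  cases hp : parts ++ [b] with
  | nil => exact absurd hp hne
  | cons h t =>
    have : (h :: t).reverse = t.reverse ++ [h] := by simp
    rw [this]
    rw [List.dropLast_concat, List.getLastD_concat]
    rw [foldBE_reverse]
    simp [valLE]; ring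

theorem a_eq_fspec (bs : List Int) (h : ∃ x ∈ bs, x < 128) (parts : List Int) :
    auleb_fin (auleb_loop bs parts)
      = ((fspec bs).1, valLE parts + 128 ^ parts.length * (fspec bs).2) := by
  induction bs generalizing parts with
  | nil => simp at h
  | cons b rest ih =>
    by_cases hb : b ≥ 128
    · have hrest : ∃ x ∈ rest, x < 128 := by
        obtain ⟨x, hx, hlt⟩ := h
        simp at hx
        rcases hx with h1 | h1
        · omega
        · exact ⟨x, h1, hlt⟩
      rw [show auleb_loop (b :: rest) parts = auleb_loop rest (parts ++ [b - 128]) by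
            simp [auleb_loop, hb]]
      rw [ih hrest]
      simp [fspec, hb, valLE_append, valLE, pow_succ]
      ring
    · rw [show auleb_loop (b :: rest) parts = (b :: rest, parts) by
            simp [auleb_loop, hb]]
      rw [auleb_fin_eq]
      simp [fspec, hb, valLE_append, valLE]

theorem b_eq_fspec (bs : List Int) (h : ∃ x ∈ bs, x < 128) (acc : Int) (shift : Nat) :
    buleb_loop bs acc shift = ((fspec bs).1, acc + 2 ^ shift * (fspec bs).2) := by
  induction bs generalizing acc shift with
  | nil => simp at h
  | cons b rest ih =>
    by_cases hb : b ≥ 128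
    · have hrest : ∃ x ∈ rest, x < 128 := by
        obtain ⟨x, hx, hlt⟩ := h
        simp at hx
        rcases hx with h1 | h1
        · omega
        · exact ⟨x, h1, hlt⟩
      rw [show buleb_loop (b :: rest) acc shift
            = buleb_loop rest (acc + (b - 128) * 2 ^ shift) (shift + 7) by
            simp [buleb_loop, hb]]
      rw [ih hrest]
      simp [fspec, hb, pow_add]
      ring
    · simp [buleb_loop, hb, fspec]
      ring

-- ===== VERDICT (by name: the statement is the Claim_ definition above) =====
theorem get_uleb126_spec : Claim_equal_get_uleb126 := by
  intro bs _ hpre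
  unfold Spec_get_uleb126 get_uleb126 get_uleb126_alt
  rw [a_eq_fspec bs hpre [], b_eq_fspec bs hpre 0 0]
  simp [valLE]
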